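-- pv_equiv track=rewrite | github.com/paulklemstine/factor | lean/demo/Pythagorean/PythagoreanQuadrupleFactoringFramework/demos/modular_forms.py | r3
-- ===== SOURCE A (Python) =====
-- from math import isqrt, gcd
--
-- def r3(N):
--     """Count the number of representations of N as a sum of 3 squares.
--     Counts ordered representations with signs: a² + b² + c² = N,
--     where a, b, c can be positive, negative, or zero."""
--     if N < 0:
--         return 0
--     count = 0
--     sqrtN = isqrt(N)
--     for a in range(-sqrtN, sqrtN + 1):
--         rem1 = N - a * a
--         if rem1 < 0:
--             continue
--         sqrtR1 = isqrt(rem1)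
--         for b in range(-sqrtR1, sqrtR1 + 1):
--             rem2 = rem1 - b * b
--             if rem2 < 0:
--                 continue
--             c = isqrt(rem2)
--             if c * c == rem2:
--                 if c == 0:
--                     count += 1
--                 else:
--                     count += 2  # +c and -c
--     return count
-- ===== SOURCE B (Python) =====
-- from math import isqrt
--
-- def r3(N):
--     """Count ordered signed representations a^2+b^2+c^2 = N by looping over
--     nonnegative triples only and weighting each by 2^(number of nonzero coords)."""
--     if N < 0:
--         return 0
--     count = 0
--     for a in range(isqrt(N) + 1):
--         rem1 = N - a * a
--         for b in range(isqrt(rem1) + 1):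
--             rem2 = rem1 - b * b
--             c = isqrt(rem2)
--             if c * c == rem2:
--                 count += 2 ** ((a != 0) + (b != 0) + (c != 0))
--     return count
-- ===== Notes on version B (the rewrite author's own statement) =====
-- stated objective: faster
-- what changed: Iterate a and b over nonnegative values only and, for each nonnegative solution triple, add two raised to the number of nonzero coordinates instead of enumerating both signs of a and b and branching on the sign of c; the double loop shrinks to roughly a quarter of its iterations.
import Mathlib
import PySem

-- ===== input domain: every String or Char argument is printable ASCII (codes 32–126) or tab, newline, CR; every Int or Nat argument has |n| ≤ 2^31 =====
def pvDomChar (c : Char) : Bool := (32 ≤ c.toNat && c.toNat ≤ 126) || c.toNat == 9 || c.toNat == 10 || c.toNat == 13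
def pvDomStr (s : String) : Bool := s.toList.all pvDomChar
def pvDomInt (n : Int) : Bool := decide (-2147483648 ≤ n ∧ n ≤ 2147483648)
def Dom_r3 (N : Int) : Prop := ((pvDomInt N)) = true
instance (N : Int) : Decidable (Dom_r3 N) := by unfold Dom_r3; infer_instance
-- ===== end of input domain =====

-- B loops over nonnegative a,b only and weights each solution by two raised to its number of nonzero coordinates; measurably faster (constant factor).

-- math.isqrt (both ports call it only on nonnegative arguments)
def isqrtI (n : Int) : Int := Int.ofNat (Nat.sqrt n.toNat)

-- ===== PORT A =====
def r3 (N : Int) : Int :=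
  if N < 0 then 0
  else
    let sqrtN := isqrtI N
    (PySem.List.pyRange (-sqrtN) (sqrtN + 1) 1).foldl (fun count a =>
      let rem1 := N - a * a
      if rem1 < 0 then count
      else
        let sqrtR1 := isqrtI rem1
        (PySem.List.pyRange (-sqrtR1) (sqrtR1 + 1) 1).foldl (fun count b =>
          let rem2 := rem1 - b * b
          if rem2 < 0 then count
          else
            let c := isqrtI rem2
            if c * c = rem2 then
              if c = 0 then count + 1 else count + 2
            else count) count) 0

-- ===== PORT B =====
def r3_alt (N : Int) : Int :=
  if N < 0 then 0
  else
    (PySem.List.pyRange 0 (isqrtI N + 1) 1).foldl (fun count a =>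
      let rem1 := N - a * a
      (PySem.List.pyRange 0 (isqrtI rem1 + 1) 1).foldl (fun count b =>
        let rem2 := rem1 - b * b
        let c := isqrtI rem2
        if c * c = rem2 then
          count + 2 ^ (((if a ≠ 0 then 1 else 0) + (if b ≠ 0 then 1 else 0) + (if c ≠ 0 then 1 else 0) : Nat))
        else count) count) 0

-- ===== PRECONDITION & SPEC =====
def Spec_r3 (N : Int) (out : Int) : Prop := out = r3_alt N
instance (N : Int) (out : Int) : Decidable (Spec_r3 N out) := by unfold Spec_r3; infer_instance

-- ===== CLAIM (what is proved, stated in full; the proofs are below) =====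
def Claim_equal_r3 : Prop := ∀ (N : Int), Dom_r3 N → Spec_r3 N (r3 N)

-- ===== LEMMAS AND PROOFS =====

-- weighted term contributed by one nonnegative c-candidate
def cTerm (r2 : Int) : Int :=
  if isqrtI r2 * isqrtI r2 = r2 then (if isqrtI r2 = 0 then 1 else 2) else 0

-- B's inner sum for a fixed rem1 (without the a-multiplier)
def innerSum (r1 : Int) : Int :=
  ((PySem.List.pyRange 0 (isqrtI r1 + 1) 1).map
    (fun b => (if b = 0 then 1 else 2) * cTerm (r1 - b * b))).sum

theorem cTerm_neg {r2 : Int} (h : r2 < 0) : cTerm r2 = 0 := by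
  unfold cTerm isqrtI
  have : r2.toNat = 0 := Int.toNat_of_nonpos (le_of_lt h)
  simp [this]
  omega

theorem sym_sum (f : Int → Int) (hf : ∀ x : Int, f (-x) = f x) (s : Nat) :
    ((PySem.List.pyRange (-(s : Int)) ((s : Int) + 1) 1).map f).sum =
    ((PySem.List.pyRange 0 ((s : Int) + 1) 1).map (fun x => (if x = 0 then 1 else 2) * f x)).sum := by
  induction s with
  | zero =>
      have h0 : PySem.List.pyRange 0 1 1 = [0] := by
        have := PySem.List.pyRange_one_singleton (a := (0 : Int))
        simpa using this
      simp [h0]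
  | succ n ih =>
      have h1 : (-(↑(n+1) : Int)) < (↑(n+1) : Int) + 1 := by push_cast; omega
      have hcons : PySem.List.pyRange (-(↑(n+1) : Int)) ((↑(n+1) : Int) + 1) 1 =
          (-(↑(n+1) : Int)) :: PySem.List.pyRange (-(↑(n+1) : Int) + 1) ((↑(n+1) : Int) + 1) 1 :=
        PySem.List.pyRange_one_cons h1
      have hmid : (-(↑(n+1) : Int) + 1) = -(↑n : Int) := by push_cast; ring
      have he1 : ((↑(n+1) : Int) + 1) = ((↑n : Int) + 1) + 1 := by push_cast; ring
      have hsucc : PySem.List.pyRange (-(↑n : Int)) (((↑n : Int) + 1) + 1) 1 =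
          PySem.List.pyRange (-(↑n : Int)) ((↑n : Int) + 1) 1 ++ [((↑n : Int) + 1)] := by
        apply PySem.List.pyRange_one_succ_right
        all_goals omega
      have hsuccR : PySem.List.pyRange 0 (((↑n : Int) + 1) + 1) 1 =
          PySem.List.pyRange 0 ((↑n : Int) + 1) 1 ++ [((↑n : Int) + 1)] := by
        apply PySem.List.pyRange_one_succ_right
        all_goals omega
      rw [hcons, hmid, he1, hsucc, hsuccR, List.map_cons, List.map_append, List.map_append,
        List.sum_cons, List.sum_append, List.sum_append, List.map_singleton, List.map_singleton,
        List.sum_singleton, List.sum_singleton]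
      have hneg : f (-(↑(n+1) : Int)) = f ((↑n : Int) + 1) := by
        rw [hf ((↑(n+1) : Int))]; norm_num
      have hnz : ((↑n : Int) + 1) ≠ 0 := by omega
      rw [hneg, ih, if_neg hnz]
      ring

-- A's inner loop (body rewritten as an additive fold) equals innerSum, for every rem1
theorem innerA_eq (r1 : Int) :
    ((PySem.List.pyRange (-(isqrtI r1)) (isqrtI r1 + 1) 1).map (fun b => cTerm (r1 - b * b))).sum
      = innerSum r1 := by
  unfold innerSum
  have hf : ∀ x : Int, cTerm (r1 - (-x) * (-x)) = cTerm (r1 - x * x) := by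
    intro x; ring_nf
  have := sym_sum (fun b => cTerm (r1 - b * b)) hf (Nat.sqrt r1.toNat)
  simpa [isqrtI] using this

-- A's inner fold body equals the additive form
theorem innerA_body (r1 count : Int) :
    ((PySem.List.pyRange (-(isqrtI r1)) (isqrtI r1 + 1) 1).foldl (fun count b =>
        let rem2 := r1 - b * b
        if rem2 < 0 then count
        else
          let c := isqrtI rem2
          if c * c = rem2 then
            if c = 0 then count + 1 else count + 2
          else count) count)
    = count + ((PySem.List.pyRange (-(isqrtI r1)) (isqrtI r1 + 1) 1).map
        (fun b => cTerm (r1 - b * b))).sum := by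
  rw [← PySem.List.foldl_add]
  apply PySem.List.foldl_congr_mem
  intro acc b _
  simp only
  by_cases h1 : r1 - b * b < 0
  · rw [if_pos h1, cTerm_neg h1]; ring
  · rw [if_neg h1]; unfold cTerm; split_ifs <;> ring

-- guarded A inner value = innerSum in all cases (negative rem1 gives 0 on both sides)
theorem guarded_eq (r1 : Int) :
    (if r1 < 0 then 0
     else ((PySem.List.pyRange (-(isqrtI r1)) (isqrtI r1 + 1) 1).map
            (fun b => cTerm (r1 - b * b))).sum)
    = innerSum r1 := by
  split_ifs with h
  · unfold innerSum
    have ht : r1.toNat = 0 := Int.toNat_of_nonpos (le_of_lt h)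
    have hz : isqrtI r1 = 0 := by simp [isqrtI, ht]
    have h0 : PySem.List.pyRange 0 1 1 = [0] := by
      have := PySem.List.pyRange_one_singleton (a := (0 : Int))
      simpa using this
    rw [hz]
    norm_num [h0]
    rw [cTerm_neg h]
  · exact innerA_eq r1

-- B's inner fold equals count + ma * innerSum
theorem innerB_body (N a count : Int) :
    ((PySem.List.pyRange 0 (isqrtI (N - a * a) + 1) 1).foldl (fun count b =>
        let rem2 := (N - a * a) - b * b
        let c := isqrtI rem2
        if c * c = rem2 then
          count + 2 ^ (((if a ≠ 0 then 1 else 0) + (if b ≠ 0 then 1 else 0) + (if c ≠ 0 then 1 else 0) : Nat))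
        else count) count)
    = count + (if a = 0 then 1 else 2) * innerSum (N - a * a) := by
  unfold innerSum
  rw [← List.sum_map_mul_left, ← PySem.List.foldl_add]
  apply PySem.List.foldl_congr_mem
  intro acc b _
  simp only [cTerm, ne_eq, ite_not]
  split_ifs <;> norm_num

-- ===== VERDICT (by name: the statement is the Claim_ definition above) =====
theorem r3_spec : Claim_equal_r3 := by
  intro N _
  unfold Spec_r3 r3 r3_alt
  split_ifs with h
  · rfl
  -- rewrite A's outer fold using the inner lemmas
  have hA : ∀ (init : Int),
      ((PySem.List.pyRange (-(isqrtI N)) (isqrtI N + 1) 1).foldl (fun count a =>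
        let rem1 := N - a * a
        if rem1 < 0 then count
        else
          let sqrtR1 := isqrtI rem1
          (PySem.List.pyRange (-sqrtR1) (sqrtR1 + 1) 1).foldl (fun count b =>
            let rem2 := rem1 - b * b
            if rem2 < 0 then count
            else
              let c := isqrtI rem2
              if c * c = rem2 then
                if c = 0 then count + 1 else count + 2
              else count) count) init)
      = init + ((PySem.List.pyRange (-(isqrtI N)) (isqrtI N + 1) 1).map
          (fun a => innerSum (N - a * a))).sum := by
    intro init
    rw [← PySem.List.foldl_add]
    apply PySem.List.foldl_congr_mem
    intro acc a _
    simp only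
    rw [← guarded_eq (N - a * a)]
    split_ifs with hn
    · omega
    · rw [innerA_body]
  have hB : ∀ (init : Int),
      ((PySem.List.pyRange 0 (isqrtI N + 1) 1).foldl (fun count a =>
        let rem1 := N - a * a
        (PySem.List.pyRange 0 (isqrtI rem1 + 1) 1).foldl (fun count b =>
          let rem2 := rem1 - b * b
          let c := isqrtI rem2
          if c * c = rem2 then
            count + 2 ^ (((if a ≠ 0 then 1 else 0) + (if b ≠ 0 then 1 else 0) + (if c ≠ 0 then 1 else 0) : Nat))
          else count) count) init)
      = init + ((PySem.List.pyRange 0 (isqrtI N + 1) 1).map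
          (fun a => (if a = 0 then 1 else 2) * innerSum (N - a * a))).sum := by
    intro init
    rw [← PySem.List.foldl_add]
    apply PySem.List.foldl_congr_mem
    intro acc a _
    simp only
    rw [innerB_body]
  rw [hA 0, hB 0]
  have hsym : ∀ x : Int, innerSum (N - (-x) * (-x)) = innerSum (N - x * x) := by
    intro x; ring_nf
  have := sym_sum (fun a => innerSum (N - a * a)) hsym (Nat.sqrt N.toNat)
  simpa [isqrtI] using this
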